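-- pv_equiv track=rewrite | github.com/ingeniamc/ingeniamotion | ingeniamotion/fsoe.py | __get_safety_bytes_range_from_pdo_length
-- ===== SOURCE A (Python) =====
-- def __get_safety_bytes_range_from_pdo_length(pdo_byte_lenght: int) -> tuple[int, ...]:
--     """Get the range of bytes that belong to the safe data in a PDO map according to its length."""
--     if pdo_byte_lenght < 6:
--         raise ValueError("pdo_lenght must be at least 6")
--     elif pdo_byte_lenght == 6:
--         # Shortest PDOMap is 6 bytes, containing only one data byte
--         return (1,)
--     else:
--         # The contains slots of 2 bytes of data
--
--         # The total bytes of data is the Pdo map length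
--         # minus the 1 byte for the command and 2 bytes for the connection ID
--         # divided by 4, since each data slot has 2 bytes of data and 2 bytes of CRC
--         total_data_slots = (pdo_byte_lenght - 3) // 4
--         return tuple(
--             byt
--             for slot_i in range(total_data_slots)
--             for byt in (1 + slot_i * 4, 2 + slot_i * 4)
--         )
-- ===== SOURCE B (Python) =====
-- def __get_safety_bytes_range_from_pdo_length(pdo_byte_lenght: int) -> tuple[int, ...]:
--     """Get the range of bytes that belong to the safe data in a PDO map according to its length."""
--     if pdo_byte_lenght < 6:
--         raise ValueError("pdo_lenght must be at least 6")
--     if pdo_byte_lenght == 6: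
--         return (1,)
--     # Build the result back-to-front: start at the last data slot's first byte
--     # index, emit each pair in descending order while stepping down by 4, then
--     # reverse once at the end.
--     rev: list[int] = []
--     b = 4 * ((pdo_byte_lenght - 3) // 4) - 3
--     while b > 0:
--         rev.append(b + 1)
--         rev.append(b)
--         b -= 4
--     return tuple(reversed(rev))
-- ===== Notes on version B (the rewrite author's own statement) =====
-- stated objective: alternative
-- what changed: A's forward nested slot-then-pair generator is replaced by a back-to-front accumulator while-loop that starts at the last slot's byte index and emits each (b+1, b) pair stepping down by 4, reversing once at the end; Pre_ excludes lengths below 6, where A raises ValueError.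
import Mathlib
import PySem

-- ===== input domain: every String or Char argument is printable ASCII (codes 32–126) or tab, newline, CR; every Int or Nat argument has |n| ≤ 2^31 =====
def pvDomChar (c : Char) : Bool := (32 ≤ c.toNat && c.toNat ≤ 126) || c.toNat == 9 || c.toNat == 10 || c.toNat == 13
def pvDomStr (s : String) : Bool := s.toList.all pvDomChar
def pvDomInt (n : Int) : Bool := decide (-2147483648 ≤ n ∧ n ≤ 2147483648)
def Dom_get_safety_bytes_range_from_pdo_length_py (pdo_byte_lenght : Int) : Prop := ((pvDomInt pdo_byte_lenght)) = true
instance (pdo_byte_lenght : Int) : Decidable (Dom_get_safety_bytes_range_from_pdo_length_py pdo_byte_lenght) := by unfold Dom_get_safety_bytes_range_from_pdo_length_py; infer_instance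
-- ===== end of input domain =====

-- B replaces A's forward nested slot-then-pair generator with a back-to-front accumulator
-- loop prepending (b, b+1) pairs while stepping b down by 4 (alternative decomposition).

-- ===== PORT A =====
def get_safety_bytes_range_from_pdo_length_py (pdo_byte_lenght : Int) : List Int :=
  if pdo_byte_lenght < 6 then []  -- Python raises ValueError here; excluded by Pre_
  else if pdo_byte_lenght == 6 then [1]
  else
    let total_data_slots := PySem.Int.floordiv (pdo_byte_lenght - 3) 4
    (PySem.List.pyRange 0 total_data_slots 1).flatMap
      (fun slot_i => [1 + slot_i * 4, 2 + slot_i * 4])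

-- ===== PORT B =====
-- the while-loop of Source B: append b+1 then b, step b down by 4 while b > 0
def pvRevLoop (b : Int) (rev : List Int) : List Int :=
  if _h : 0 < b then pvRevLoop (b - 4) (rev ++ [b + 1, b]) else rev
termination_by b.toNat
decreasing_by omega

def get_safety_bytes_range_from_pdo_length_py_alt (pdo_byte_lenght : Int) : List Int :=
  if pdo_byte_lenght < 6 then []  -- Python raises ValueError here; excluded by Pre_
  else if pdo_byte_lenght == 6 then [1]
  else
    (pvRevLoop (4 * (PySem.Int.floordiv (pdo_byte_lenght - 3) 4) - 3) []).reverse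

-- ===== PRECONDITION & SPEC =====
-- Pre_ excludes pdo_byte_lenght < 6, where A (and B) raise ValueError.
def Pre_get_safety_bytes_range_from_pdo_length_py (pdo_byte_lenght : Int) : Prop := 6 ≤ pdo_byte_lenght
instance (pdo_byte_lenght : Int) : Decidable (Pre_get_safety_bytes_range_from_pdo_length_py pdo_byte_lenght) := by unfold Pre_get_safety_bytes_range_from_pdo_length_py; infer_instance
def pvWitness_get_safety_bytes_range_from_pdo_length_py : Int := (14)

def Spec_get_safety_bytes_range_from_pdo_length_py (pdo_byte_lenght : Int) (out : List Int) : Prop := out = get_safety_bytes_range_from_pdo_length_py_alt pdo_byte_lenght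
instance (pdo_byte_lenght : Int) (out : List Int) : Decidable (Spec_get_safety_bytes_range_from_pdo_length_py pdo_byte_lenght out) := by unfold Spec_get_safety_bytes_range_from_pdo_length_py; infer_instance

-- ===== CLAIM (what is proved, stated in full; the proofs are below) =====
def Claim_equal_get_safety_bytes_range_from_pdo_length_py : Prop := ∀ (pdo_byte_lenght : Int), Dom_get_safety_bytes_range_from_pdo_length_py pdo_byte_lenght → Pre_get_safety_bytes_range_from_pdo_length_py pdo_byte_lenght → Spec_get_safety_bytes_range_from_pdo_length_py pdo_byte_lenght (get_safety_bytes_range_from_pdo_length_py pdo_byte_lenght)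

-- ===== LEMMAS AND PROOFS =====
-- cons-accumulator view of pvRevLoop's reversed result (proof-only helper)
def pvAltLoop (b : Int) (acc : List Int) : List Int :=
  if h : 0 < b then pvAltLoop (b - 4) (b :: (b + 1) :: acc) else acc
termination_by b.toNat
decreasing_by omega

lemma pvRevLoop_reverse (b : Int) (rev : List Int) :
    (pvRevLoop b rev).reverse = pvAltLoop b rev.reverse := by
  by_cases h : 0 < b
  · rw [pvRevLoop, dif_pos h, pvAltLoop, dif_pos h,
        pvRevLoop_reverse (b - 4) (rev ++ [b + 1, b])]
    simp
  · rw [pvRevLoop, dif_neg h, pvAltLoop, dif_neg h]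
termination_by b.toNat
decreasing_by omega

lemma pv_key (s : Nat) (acc : List Int) :
    (PySem.List.pyRange 0 (s : Int) 1).flatMap (fun slot_i => [1 + slot_i * 4, 2 + slot_i * 4]) ++ acc =
    pvAltLoop (4 * (s : Int) - 3) acc := by
  induction s generalizing acc with
  | zero =>
    rw [pvAltLoop]
    norm_num [PySem.List.pyRange_one_eq_nil]
  | succ s ih =>
    rw [pvAltLoop]
    push_cast
    rw [dif_pos (by omega : (0 : Int) < 4 * ((s : Int) + 1) - 3)]
    have hstep : 4 * ((s : Int) + 1) - 3 - 4 = 4 * (s : Int) - 3 := by ring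
    rw [hstep, ← ih]
    rw [PySem.List.pyRange_one_succ_right (by positivity : (0:Int) ≤ (s:Int)), List.flatMap_append]
    simp only [List.flatMap_cons, List.flatMap_nil, List.append_nil, List.append_assoc,
      List.cons_append, List.nil_append]
    ring_nf

-- ===== VERDICT (by name: the statement is the Claim_ definition above) =====
theorem get_safety_bytes_range_from_pdo_length_py_spec : Claim_equal_get_safety_bytes_range_from_pdo_length_py := by
  intro n _ hpre
  unfold Pre_get_safety_bytes_range_from_pdo_length_py at hpre
  unfold Spec_get_safety_bytes_range_from_pdo_length_py
  unfold get_safety_bytes_range_from_pdo_length_py get_safety_bytes_range_from_pdo_length_py_alt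
  have hnlt : ¬ n < 6 := by omega
  simp only [hnlt, if_false]
  by_cases h6 : n = 6
  · simp [h6]
  · simp only [show (n == 6) = false by simp [h6], Bool.false_eq_true, if_false]
    have hs : 0 ≤ PySem.Int.floordiv (n - 3) 4 := by
      rw [PySem.Int.floordiv_eq_ediv_of_pos (by norm_num : (0:Int) < 4)]
      omega
    have := pv_key (PySem.Int.floordiv (n - 3) 4).toNat []
    rw [Int.toNat_of_nonneg hs] at this
    rw [pvRevLoop_reverse]
    simpa using this
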